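-- pv_equiv track=rewrite | github.com/daniel-reich/ubiquitous-fiesta | uWpS5xMjzZFAkiQzL_16.py | odds_vs_evens
-- ===== SOURCE A (Python) =====
-- def odds_vs_evens(num):
--   odd = sum([int(i) for i in str(num) if int(i) % 2 == 1])
--   even = sum([int(i) for i in str(num) if int(i) % 2 == 0])
--
--   if odd == even:
--     return 'equal'
--   elif odd > even:
--     return 'odd'
--   elif even > odd:
--     return 'even'
-- ===== SOURCE B (Python) =====
-- def odds_vs_evens(num):
--   def diff(n):
--     if n <= 0:
--       return 0
--     n2, d = divmod(n, 10)
--     return (d if d % 2 else -d) + diff(n2)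
--   t = diff(num)
--   if t == 0:
--     return 'equal'
--   return 'odd' if t > 0 else 'even'
-- ===== Notes on version B (the rewrite author's own statement) =====
-- stated objective: alternative
-- what changed: B never builds str(num) and keeps no per-parity sums: it extracts digits arithmetically by recursive divmod(n, 10) and maintains a single signed accumulator (add odd digits, subtract even ones), classifying by the sign of that difference; A makes two list-comprehension passes over str(num) summing odds and evens separately.
import Mathlib
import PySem

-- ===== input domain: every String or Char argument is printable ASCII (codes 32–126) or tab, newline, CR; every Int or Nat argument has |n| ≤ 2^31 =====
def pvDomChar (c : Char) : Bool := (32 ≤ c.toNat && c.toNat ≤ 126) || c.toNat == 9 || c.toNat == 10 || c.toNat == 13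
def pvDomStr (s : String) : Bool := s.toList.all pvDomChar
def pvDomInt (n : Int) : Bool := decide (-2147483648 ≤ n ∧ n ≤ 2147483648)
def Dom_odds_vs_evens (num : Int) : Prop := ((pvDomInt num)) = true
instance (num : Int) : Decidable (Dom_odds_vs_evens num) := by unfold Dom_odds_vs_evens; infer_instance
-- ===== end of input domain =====

-- B avoids str(num) entirely: it extracts digits by recursive divmod(n, 10) and keeps one
-- signed accumulator (odd digits added, even digits subtracted), classifying by its sign;
-- objective: alternative.

-- ===== PORT A =====
-- int(i) for a one-character string i of str(num)
def pyDigit (c : Char) : Int := (PySem.Int.ofChars? [c]).getD 0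

def odds_vs_evens (num : Int) : String :=
  let s := PySem.Int.toChars num
  let odd := ((s.filter (fun c => PySem.Int.mod (pyDigit c) 2 == 1)).map pyDigit).sum
  let even := ((s.filter (fun c => PySem.Int.mod (pyDigit c) 2 == 0)).map pyDigit).sum
  if odd == even then "equal"
  else if odd > even then "odd"
  else "even"

-- ===== PORT B =====
-- B's recursive helper diff(n): (d if d % 2 else -d) summed over the divmod digit stream
def pyDiff (n : Int) : Int :=
  if h : 0 < n then
    let q := PySem.Int.floordiv n 10
    let d := PySem.Int.mod n 10
    (if PySem.Int.mod d 2 ≠ 0 then d else -d) + pyDiff q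
  else 0
termination_by n.toNat
decreasing_by
  have hq : PySem.Int.floordiv n 10 = n / 10 := PySem.Int.floordiv_eq_ediv_of_pos (by omega)
  have h1 : n / 10 < n := by omega
  have h2 : 0 ≤ n / 10 := by omega
  simp only [hq]
  omega

def odds_vs_evens_alt (num : Int) : String :=
  let t := pyDiff num
  if t == 0 then "equal"
  else if t > 0 then "odd"
  else "even"

-- ===== PRECONDITION & SPEC =====
-- Pre_ excludes negative num, on which Python A raises ValueError at int('-').
def Pre_odds_vs_evens (num : Int) : Prop := 0 ≤ num
instance (num : Int) : Decidable (Pre_odds_vs_evens num) := by unfold Pre_odds_vs_evens; infer_instance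
def pvWitness_odds_vs_evens : Int := (13457)

def Spec_odds_vs_evens (num : Int) (out : String) : Prop := out = odds_vs_evens_alt num
instance (num : Int) (out : String) : Decidable (Spec_odds_vs_evens num out) := by unfold Spec_odds_vs_evens; infer_instance

-- ===== CLAIM (what is proved, stated in full; the proofs are below) =====
def Claim_equal_odds_vs_evens : Prop := ∀ (num : Int), Dom_odds_vs_evens num → Pre_odds_vs_evens num → Spec_odds_vs_evens num (odds_vs_evens num)

-- ===== LEMMAS AND PROOFS =====

-- abbreviations for A's two sums over a digit string
def aOdd (l : List Char) : Int :=
  ((l.filter (fun c => PySem.Int.mod (pyDigit c) 2 == 1)).map pyDigit).sum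
def aEven (l : List Char) : Int :=
  ((l.filter (fun c => PySem.Int.mod (pyDigit c) 2 == 0)).map pyDigit).sum

lemma aOdd_append (l1 l2 : List Char) : aOdd (l1 ++ l2) = aOdd l1 + aOdd l2 := by
  simp [aOdd, List.filter_append]

lemma aEven_append (l1 l2 : List Char) : aEven (l1 ++ l2) = aEven l1 + aEven l2 := by
  simp [aEven, List.filter_append]

-- toDigitsCore: the accumulator is appended on the right
lemma toDigitsCore_acc (b : Nat) : ∀ (f n : Nat) (acc : List Char),
    Nat.toDigitsCore b f n acc = Nat.toDigitsCore b f n [] ++ acc := by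
  intro f
  induction f with
  | zero => intro n acc; simp [Nat.toDigitsCore]
  | succ f ih =>
    intro n acc
    simp only [Nat.toDigitsCore]
    split
    · rfl
    · rw [ih (n / b) (Nat.digitChar (n % b) :: acc), ih (n / b) [Nat.digitChar (n % b)]]
      simp

-- the fuel does not matter as long as it exceeds n
lemma toDigitsCore_fuel (b : Nat) (hb : 2 ≤ b) : ∀ (n f1 f2 : Nat), n < f1 → n < f2 →
    Nat.toDigitsCore b f1 n [] = Nat.toDigitsCore b f2 n [] := by
  intro n
  induction n using Nat.strong_induction_on with
  | _ n ih =>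
    intro f1 f2 h1 h2
    match f1, f2 with
    | f1 + 1, f2 + 1 =>
      by_cases h0 : n / b = 0
      · simp [Nat.toDigitsCore, h0]
      · have hn0 : 0 < n := by
          rcases Nat.eq_zero_or_pos n with h | h
          · exact absurd (by simp [h]) h0
          · exact h
        have hdlt : n / b < n := Nat.div_lt_self hn0 (by omega)
        simp only [Nat.toDigitsCore, h0, if_false]
        rw [toDigitsCore_acc b f1 (n / b), toDigitsCore_acc b f2 (n / b),
            ih (n / b) hdlt f1 f2 (by omega) (by omega)]

-- one unfolding step of toDigitsCore at successor fuel, accumulator pulled out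
lemma toDigitsCore_succ (b f n : Nat) (h0 : ¬ n / b = 0) :
    Nat.toDigitsCore b (f + 1) n [] = Nat.toDigitsCore b f (n / b) [] ++ [Nat.digitChar (n % b)] := by
  simp only [Nat.toDigitsCore, h0, if_false]
  exact toDigitsCore_acc b f (n / b) [Nat.digitChar (n % b)]

-- structural unfolding of base-10 toDigits for n ≥ 10
lemma toDigits10_step (n : Nat) (h : 10 ≤ n) :
    Nat.toDigits 10 n = Nat.toDigits 10 (n / 10) ++ [Nat.digitChar (n % 10)] := by
  have h0 : ¬ n / 10 = 0 := by omega
  calc Nat.toDigits 10 n = Nat.toDigitsCore 10 (n + 1) n [] := rfl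
    _ = Nat.toDigitsCore 10 n (n / 10) [] ++ [Nat.digitChar (n % 10)] := toDigitsCore_succ 10 n n h0
    _ = Nat.toDigitsCore 10 (n / 10 + 1) (n / 10) [] ++ [Nat.digitChar (n % 10)] := by
        rw [toDigitsCore_fuel 10 (by norm_num) (n / 10) n (n / 10 + 1) (by omega) (by omega)]
    _ = Nat.toDigits 10 (n / 10) ++ [Nat.digitChar (n % 10)] := rfl

lemma toDigits10_small (n : Nat) (h : n < 10) :
    Nat.toDigits 10 n = [Nat.digitChar n] := by
  have h0 : n / 10 = 0 := by omega
  have h1 : n % 10 = n := by omega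
  simp [Nat.toDigits, Nat.toDigitsCore, h0, h1]

-- per-digit bookkeeping: B's signed term equals A's odd-minus-even on the single digit char
lemma digit_term (d : Nat) (hd : d < 10) :
    (if PySem.Int.mod ((d : Int)) 2 ≠ 0 then (d : Int) else -(d : Int))
      = aOdd [Nat.digitChar d] - aEven [Nat.digitChar d] := by
  interval_cases d <;> decide

-- casts of the divmod primitives at divisor 10
lemma floordiv_ten (n : Nat) : PySem.Int.floordiv (n : Int) 10 = ((n / 10 : Nat) : Int) := by
  exact_mod_cast PySem.Int.floordiv_natCast n 10

lemma mod_ten (n : Nat) : PySem.Int.mod (n : Int) 10 = ((n % 10 : Nat) : Int) := by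
  exact_mod_cast PySem.Int.mod_natCast n 10

-- the key invariant: B's recursion computes A's odd sum minus A's even sum
lemma pyDiff_eq (n : Nat) : pyDiff (n : Int) = aOdd (Nat.toDigits 10 n) - aEven (Nat.toDigits 10 n) := by
  induction n using Nat.strong_induction_on with
  | _ n ih =>
    by_cases h0 : n = 0
    · subst h0
      rw [pyDiff]
      simp only []
      decide
    · have hpos : (0 : Int) < (n : Int) := by exact_mod_cast Nat.pos_of_ne_zero h0
      rw [pyDiff]
      simp only [hpos, dif_pos, floordiv_ten, mod_ten]
      rw [ih (n / 10) (Nat.div_lt_self (Nat.pos_of_ne_zero h0) (by norm_num)),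
          digit_term (n % 10) (by omega)]
      by_cases h10 : 10 ≤ n
      · rw [toDigits10_step n h10, aOdd_append, aEven_append]
        ring
      · have hq : n / 10 = 0 := by omega
        have hm : n % 10 = n := by omega
        rw [hq, hm, toDigits10_small n (by omega)]
        have : aOdd (Nat.toDigits 10 0) - aEven (Nat.toDigits 10 0) = 0 := by decide
        rw [this]
        ring

-- ===== VERDICT (by name: the statement is the Claim_ definition above) =====
theorem odds_vs_evens_spec : Claim_equal_odds_vs_evens := by
  intro num _ hpre
  unfold Spec_odds_vs_evens odds_vs_evens odds_vs_evens_alt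
  obtain ⟨n, rfl⟩ : ∃ m : Nat, (m : Int) = num := ⟨num.toNat, Int.toNat_of_nonneg hpre⟩
  have hs : PySem.Int.toChars (n : Int) = Nat.toDigits 10 n := by
    simp [PySem.Int.toChars, show ¬ ((n : Int) < 0) by omega]
  have hk : pyDiff (n : Int)
      = (((Nat.toDigits 10 n).filter (fun c => PySem.Int.mod (pyDigit c) 2 == 1)).map pyDigit).sum
        - (((Nat.toDigits 10 n).filter (fun c => PySem.Int.mod (pyDigit c) 2 == 0)).map pyDigit).sum := by
    simpa [aOdd, aEven] using pyDiff_eq n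
  simp only [hs, hk, beq_iff_eq, gt_iff_lt]
  split_ifs <;> first | rfl | omega
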